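-- pv_equiv track=rewrite | github.com/Vogelspinnetje/DataStructures-Algorithms | max_distance.py | max_distance
-- ===== SOURCE A (Python) =====
-- def max_distance(intervals: list[list[int]]) -> int:
--     """
--     Calculates the maximum difference between a minimum and a maximum value from different intervals,
--     where the minimum and maximum cannot come from the same interval.
--
--     Constraints: 2 <= len(intervals) <= 10^5
--                  1 <= intervals[i].lengte <= 500
--                  -10^4 <= intervals[i][j] <= 10^4
--                  intervals[i] is sorted in ascending order
--                  Runtime < 1 minute
--
--     Args:
--         intervals (list[list[int]]): A list of intervals, each represented as a list of two integers [min, max].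
--
--     Returns:
--         int: The maximum difference between a minimum and a maximum from different intervals.
--     """
--     min_values = [interval[0] for interval in intervals]
--     max_values = [interval[-1] for interval in intervals]
--
--     global_min = min(min_values)
--     global_max = max(max_values)
--
--     index_min = min_values.index(global_min)
--     index_max = max_values.index(global_max)
--
--     # If min and max come from the same interval, look for alternatives
--     if index_min == index_max:
--         # Remove the min and max values from that interval
--         min_values.pop(index_min)
--         max_values.pop(index_max)
--
--         second_min = min(min_values)
--         second_max = max(max_values)
--
--         # Determine max difference considering second min and max values
--         difference = max(global_max - second_min, second_max - global_min)
--     else: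
--         difference = global_max - global_min
--
--     return difference
-- ===== SOURCE B (Python) =====
-- def max_distance(intervals: list[list[int]]) -> int:
--     # Single forward pass: each candidate pairs the current interval with
--     # extrema drawn from strictly earlier (hence different) intervals.
--     run_min = intervals[0][0]
--     run_max = intervals[0][-1]
--     best = None
--     for interval in intervals[1:]:
--         lo = interval[0]
--         hi = interval[-1]
--         cand = max(hi - run_min, run_max - lo)
--         best = cand if best is None else max(best, cand)
--         run_min = min(run_min, lo)
--         run_max = max(run_max, hi)
--     return best
-- ===== Notes on version B (the rewrite author's own statement) =====
-- stated objective: simpler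
-- what changed: Replaced the build-two-lists / global-extremes / index-compare / same-interval-pop logic with a single forward pass keeping only a running min of interval starts, a running max of interval ends, and the best difference seen, so no index lookups, pops or second-pass min/max are needed.
import Mathlib
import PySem

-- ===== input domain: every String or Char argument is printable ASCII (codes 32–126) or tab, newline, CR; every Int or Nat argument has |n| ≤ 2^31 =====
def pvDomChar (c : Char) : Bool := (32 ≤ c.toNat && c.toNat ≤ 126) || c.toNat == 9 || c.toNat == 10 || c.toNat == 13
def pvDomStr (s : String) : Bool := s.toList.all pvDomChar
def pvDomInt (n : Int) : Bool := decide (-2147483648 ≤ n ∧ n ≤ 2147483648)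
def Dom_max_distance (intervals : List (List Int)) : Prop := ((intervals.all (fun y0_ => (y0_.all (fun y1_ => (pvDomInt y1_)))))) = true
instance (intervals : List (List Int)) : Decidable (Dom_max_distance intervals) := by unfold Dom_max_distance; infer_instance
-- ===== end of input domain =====

-- B replaces A's build-two-lists / global-extremes / same-interval-pop logic by a single
-- forward pass with two running extrema (objective: simpler, same O(n) cost).

-- ===== PORT A =====
-- interval[0] / interval[-1] are total under Pre_ (every interval nonempty); the `.getD 0`
-- and the `| _, _ => 0` fallthroughs are only reached where Python raises (excluded by Pre_).
def max_distance (intervals : List (List Int)) : Int :=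
  let min_values := intervals.map (fun interval => (PySem.List.pyGet? interval 0).getD 0)
  let max_values := intervals.map (fun interval => (PySem.List.pyGet? interval (-1)).getD 0)
  match PySem.List.min? min_values (fun x => x), PySem.List.max? max_values (fun x => x) with
  | some global_min, some global_max =>
    match PySem.List.index? min_values global_min, PySem.List.index? max_values global_max with
    | some index_min, some index_max =>
      if index_min = index_max then
        match PySem.List.pop? min_values (index_min : Int), PySem.List.pop? max_values (index_max : Int) with
        | some (_, min_values'), some (_, max_values') =>
          match PySem.List.min? min_values' (fun x => x), PySem.List.max? max_values' (fun x => x) with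
          | some second_min, some second_max =>
            max (global_max - second_min) (second_max - global_min)
          | _, _ => 0  -- Python: min([]) raises ValueError (only one interval); excluded by Pre_
        | _, _ => 0    -- unreachable: the indices are in range
      else global_max - global_min
    | _, _ => 0        -- unreachable: the extrema are members of their lists
  | _, _ => 0          -- Python: min([]) raises ValueError (no intervals); excluded by Pre_

-- ===== PORT B =====
-- the loop body of Source B
def pvStepB (st : Int × Int × Option Int) (interval : List Int) : Int × Int × Option Int :=
  let lo := (PySem.List.pyGet? interval 0).getD 0
  let hi := (PySem.List.pyGet? interval (-1)).getD 0
  let cand := max (hi - st.1) (st.2.1 - lo)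
  let best := match st.2.2 with | none => cand | some b => max b cand
  (min st.1 lo, max st.2.1 hi, some best)

def max_distance_alt (intervals : List (List Int)) : Int :=
  match intervals with
  | [] => 0  -- Python: IndexError on intervals[0]; excluded by Pre_
  | first :: rest =>
    let run_min := (PySem.List.pyGet? first 0).getD 0
    let run_max := (PySem.List.pyGet? first (-1)).getD 0
    ((rest.foldl pvStepB (run_min, run_max, none)).2.2).getD 0
    -- Python returns best = None when rest = [] (a single interval); excluded by Pre_

-- ===== PRECONDITION & SPEC =====
-- Exactly where Python A returns: at least two intervals (else min([]) raises ValueError,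
-- directly or after the pop) and every interval nonempty (else interval[0] raises IndexError).
def Pre_max_distance (intervals : List (List Int)) : Prop :=
  2 ≤ intervals.length ∧ ∀ interval ∈ intervals, interval ≠ []

instance (intervals : List (List Int)) : Decidable (Pre_max_distance intervals) := by
  unfold Pre_max_distance; infer_instance

def pvWitness_max_distance : List (List Int) := [[1, 5], [3, 10]]

def Spec_max_distance (intervals : List (List Int)) (out : Int) : Prop := out = max_distance_alt intervals
instance (intervals : List (List Int)) (out : Int) : Decidable (Spec_max_distance intervals out) := by unfold Spec_max_distance; infer_instance

-- ===== CLAIM (what is proved, stated in full; the proofs are below) =====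
def Claim_equal_max_distance : Prop := ∀ (intervals : List (List Int)), Dom_max_distance intervals → Pre_max_distance intervals → Spec_max_distance intervals (max_distance intervals)

-- ===== LEMMAS AND PROOFS =====

-- the (start, end) pair both ports read from an interval
def pvPair (interval : List Int) : Int × Int :=
  ((PySem.List.pyGet? interval 0).getD 0, (PySem.List.pyGet? interval (-1)).getD 0)

-- v is the maximum of endpoint−startpoint over pairs of DISTINCT positions
def IPM (l : List (Int × Int)) (v : Int) : Prop :=
  (∃ (i j : Nat) (hi : i < l.length) (hj : j < l.length), i ≠ j ∧ v = (l[j]).2 - (l[i]).1) ∧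
  (∀ (i j : Nat) (hi : i < l.length) (hj : j < l.length), i ≠ j → (l[j]).2 - (l[i]).1 ≤ v)

theorem IPM_unique {l : List (Int × Int)} {v w : Int} (hv : IPM l v) (hw : IPM l w) : v = w := by
  obtain ⟨⟨i, j, hi, hj, hne, hvv⟩, hvb⟩ := hv
  obtain ⟨⟨i', j', hi', hj', hne', hww⟩, hwb⟩ := hw
  have h1 : v ≤ w := hvv ▸ hwb i j hi hj hne
  have h2 : w ≤ v := hww ▸ hvb i' j' hi' hj' hne'
  omega

-- B's step seen on pairs
def pvStepP (st : Int × Int × Option Int) (q : Int × Int) : Int × Int × Option Int :=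
  let cand := max (q.2 - st.1) (st.2.1 - q.1)
  let best := match st.2.2 with | none => cand | some b => max b cand
  (min st.1 q.1, max st.2.1 q.2, some best)

theorem foldB_eq (rest : List (List Int)) (st : Int × Int × Option Int) :
    rest.foldl pvStepB st = (rest.map pvPair).foldl pvStepP st := by
  have h : pvStepB = fun st iv => pvStepP st (pvPair iv) := rfl
  rw [List.foldl_map, h]

theorem fold_inv (p0 : Int × Int) (t : List (Int × Int)) :
    (∀ q ∈ p0 :: t, (t.foldl pvStepP (p0.1, p0.2, none)).1 ≤ q.1) ∧
    (∃ q ∈ p0 :: t, (t.foldl pvStepP (p0.1, p0.2, none)).1 = q.1) ∧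
    (∀ q ∈ p0 :: t, q.2 ≤ (t.foldl pvStepP (p0.1, p0.2, none)).2.1) ∧
    (∃ q ∈ p0 :: t, (t.foldl pvStepP (p0.1, p0.2, none)).2.1 = q.2) ∧
    ((t = [] → (t.foldl pvStepP (p0.1, p0.2, none)).2.2 = none) ∧
     (t ≠ [] → ∃ v, (t.foldl pvStepP (p0.1, p0.2, none)).2.2 = some v ∧ IPM (p0 :: t) v)) := by
  induction t using List.reverseRecOn with
  | nil =>
    refine ⟨?_, ⟨p0, by simp, rfl⟩, ?_, ⟨p0, by simp, rfl⟩, fun _ => rfl, fun h => absurd rfl h⟩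
    · intro r hr; simp at hr; subst hr; exact le_refl _
    · intro r hr; simp at hr; subst hr; exact le_refl _
  | append_singleton s q ih =>
    rcases hfold : s.foldl pvStepP (p0.1, p0.2, none) with ⟨m, M, b⟩
    rw [hfold] at ih
    obtain ⟨ih1, ⟨r2, hr2m, hr2⟩, ih3, ⟨r4, hr4m, hr4⟩, ih5, ih6⟩ := ih
    dsimp only at ih1 hr2 ih3 hr4 ih5 ih6
    simp only [List.foldl_append, hfold, List.foldl_cons, List.foldl_nil, pvStepP]
    have hsplit : p0 :: (s ++ [q]) = (p0 :: s) ++ [q] := rfl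
    refine ⟨?_, ?_, ?_, ?_, fun h => absurd h (by simp), ?_⟩
    · intro r hr
      rw [hsplit, List.mem_append, List.mem_singleton] at hr
      rcases hr with hr | hr
      · exact le_trans (min_le_left _ _) (ih1 r hr)
      · subst hr; exact min_le_right _ _
    · rcases min_choice m q.1 with h | h
      · exact ⟨r2, by rw [hsplit, List.mem_append]; exact Or.inl hr2m, by rw [h]; exact hr2⟩
      · exact ⟨q, by simp, h⟩
    · intro r hr
      rw [hsplit, List.mem_append, List.mem_singleton] at hr
      rcases hr with hr | hr
      · exact le_trans (ih3 r hr) (le_max_left _ _)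
      · subst hr; exact le_max_right _ _
    · rcases max_choice M q.2 with h | h
      · exact ⟨r4, by rw [hsplit, List.mem_append]; exact Or.inl hr4m, by rw [h]; exact hr4⟩
      · exact ⟨q, by simp, h⟩
    · intro _
      cases b with
      | none =>
        -- previous best was None: the processed prefix was the single pair p0
        have hs : s = [] := by
          by_contra hsne
          obtain ⟨v, hv, _⟩ := ih6 hsne
          simp at hv
        subst hs
        -- st = init, so m = p0.1, M = p0.2
        have hfold' : ((p0.1, p0.2, none) : Int × Int × Option Int) = (m, M, none) := hfold
        obtain ⟨hm, hM⟩ : p0.1 = m ∧ p0.2 = M := by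
          refine ⟨congrArg (·.1) hfold', congrArg (·.2.1) hfold'⟩
        refine ⟨max (q.2 - m) (M - q.1), rfl, ?_, ?_⟩
        · rcases max_choice (q.2 - m) (M - q.1) with h | h
          · exact ⟨0, 1, by simp, by simp, by omega, by simp [h, hm]⟩
          · exact ⟨1, 0, by simp, by simp, by omega, by simp [h, hM]⟩
        · intro i j hi hj hne
          have hi2 : i < 2 := by simp at hi; omega
          have hj2 : j < 2 := by simp at hj; omega
          have hcases : (i = 0 ∧ j = 1) ∨ (i = 1 ∧ j = 0) := by omega
          rcases hcases with ⟨hi0, hj1⟩ | ⟨hi1, hj0⟩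
          · subst hi0; subst hj1; simpa [← hm] using le_max_left (q.2 - m) (M - q.1)
          · subst hi1; subst hj0; simpa [← hM] using le_max_right (q.2 - m) (M - q.1)
      | some v =>
        have hsne : s ≠ [] := by
          intro hs; subst hs
          have : (none : Option Int) = some v := congrArg (·.2.2) hfold
          simp at this
        obtain ⟨v', hv', hIPM⟩ := ih6 hsne
        have hvv : v = v' := by simpa using hv'
        subst hvv
        have hLlen : (p0 :: s).length = s.length + 1 := rfl
        have hlen2 : (p0 :: (s ++ [q])).length = s.length + 2 := by simp
        have hgetL : ∀ (k : Nat) (hk : k < s.length + 1) (hk2 : k < (p0 :: (s ++ [q])).length),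
            (p0 :: (s ++ [q]))[k]'hk2 = (p0 :: s)[k]'hk := by
          intro k hk hk2
          exact List.getElem_append_left (as := p0 :: s) (bs := [q]) hk
        have hgetq : ∀ (hk : s.length + 1 < (p0 :: (s ++ [q])).length),
            (p0 :: (s ++ [q]))[s.length + 1]'hk = q := by
          intro hk
          exact List.getElem_concat_length (l := p0 :: s) (a := q) rfl _
        refine ⟨max v (max (q.2 - m) (M - q.1)), rfl, ?_, ?_⟩
        · rcases max_choice v (max (q.2 - m) (M - q.1)) with h | h
          · obtain ⟨i, j, hi, hj, hne, hval⟩ := hIPM.1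
            rw [hLlen] at hi hj
            refine ⟨i, j, by rw [hlen2]; omega, by rw [hlen2]; omega, hne, ?_⟩
            rw [hgetL i hi (by rw [hlen2]; omega), hgetL j hj (by rw [hlen2]; omega), h, hval]
            rfl
          · rcases max_choice (q.2 - m) (M - q.1) with h2 | h2
            · obtain ⟨i, hi, hri⟩ := List.mem_iff_getElem.mp hr2m
              have hi' : i < s.length + 1 := hLlen ▸ hi
              refine ⟨i, s.length + 1, by rw [hlen2]; omega, by rw [hlen2]; omega, by omega, ?_⟩
              rw [hgetL i hi' (by rw [hlen2]; omega), hgetq, h, h2]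
              have hm' : ((p0 :: s)[i]'hi').1 = m := by
                rw [hr2]; exact congrArg Prod.fst hri
              rw [hm']
            · obtain ⟨j, hj, hrj⟩ := List.mem_iff_getElem.mp hr4m
              have hj' : j < s.length + 1 := hLlen ▸ hj
              refine ⟨s.length + 1, j, by rw [hlen2]; omega, by rw [hlen2]; omega, by omega, ?_⟩
              rw [hgetL j hj' (by rw [hlen2]; omega), hgetq, h, h2]
              have hM' : ((p0 :: s)[j]'hj').2 = M := by
                rw [hr4]; exact congrArg Prod.snd hrj
              rw [hM']
        · intro i j hi hj hne
          rw [hlen2] at hi hj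
          have hvle : v ≤ max v (max (q.2 - m) (M - q.1)) := le_max_left _ _
          have hc1 : q.2 - m ≤ max v (max (q.2 - m) (M - q.1)) :=
            le_trans (le_max_left _ _) (le_max_right _ _)
          have hc2 : M - q.1 ≤ max v (max (q.2 - m) (M - q.1)) :=
            le_trans (le_max_right _ _) (le_max_right _ _)
          by_cases hjq : j = s.length + 1
          · subst hjq
            have hiq : i < s.length + 1 := by omega
            rw [hgetq, hgetL i hiq (by rw [hlen2]; omega)]
            have hmle : m ≤ ((p0 :: s)[i]'hiq).1 := ih1 _ (List.getElem_mem hiq)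
            omega
          · by_cases hiq : i = s.length + 1
            · subst hiq
              have hjlt : j < s.length + 1 := by omega
              rw [hgetq, hgetL j hjlt (by rw [hlen2]; omega)]
              have hMge : ((p0 :: s)[j]'hjlt).2 ≤ M := ih3 _ (List.getElem_mem hjlt)
              omega
            · have hilt : i < s.length + 1 := by omega
              have hjlt : j < s.length + 1 := by omega
              rw [hgetL i hilt (by rw [hlen2]; omega), hgetL j hjlt (by rw [hlen2]; omega)]
              have := hIPM.2 i j (hLlen ▸ hilt) (hLlen ▸ hjlt) hne
              omega

theorem alt_ipm (intervals : List (List Int)) (h : 2 ≤ intervals.length) :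
    IPM (intervals.map pvPair) (max_distance_alt intervals) := by
  cases intervals with
  | nil => simp at h
  | cons first rest =>
    have hrne : rest.map pvPair ≠ [] := by
      simp only [ne_eq, List.map_eq_nil_iff]
      intro he; subst he; simp at h
    obtain ⟨-, -, -, -, -, h6⟩ := fold_inv (pvPair first) (rest.map pvPair)
    obtain ⟨v, hv, hIPM⟩ := h6 hrne
    have hred : max_distance_alt (first :: rest) =
        ((rest.foldl pvStepB ((PySem.List.pyGet? first 0).getD 0,
          (PySem.List.pyGet? first (-1)).getD 0, none)).2.2).getD 0 := rfl
    rw [hred, foldB_eq]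
    have hinit : (((PySem.List.pyGet? first 0).getD 0 : Int),
        ((PySem.List.pyGet? first (-1)).getD 0 : Int), (none : Option Int)) =
        ((pvPair first).1, (pvPair first).2, none) := rfl
    rw [hinit, hv]
    simpa using hIPM

-- the part of A after building the two value lists, abstracted over those lists
def pvACore (min_values max_values : List Int) : Int :=
  match PySem.List.min? min_values (fun x => x), PySem.List.max? max_values (fun x => x) with
  | some global_min, some global_max =>
    match PySem.List.index? min_values global_min, PySem.List.index? max_values global_max with
    | some index_min, some index_max =>
      if index_min = index_max then
        match PySem.List.pop? min_values (index_min : Int), PySem.List.pop? max_values (index_max : Int) with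
        | some (_, min_values'), some (_, max_values') =>
          match PySem.List.min? min_values' (fun x => x), PySem.List.max? max_values' (fun x => x) with
          | some second_min, some second_max =>
            max (global_max - second_min) (second_max - global_min)
          | _, _ => 0
        | _, _ => 0
      else global_max - global_min
    | _, _ => 0
  | _, _ => 0

theorem acore_ipm (ps : List (Int × Int)) (h2 : 2 ≤ ps.length) :
    IPM ps (pvACore (ps.map Prod.fst) (ps.map Prod.snd)) := by
  set mins := ps.map Prod.fst with hm
  set maxs := ps.map Prod.snd with hM
  have hlm : mins.length = ps.length := by simp [hm]
  have hlM : maxs.length = ps.length := by simp [hM]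
  have hpsne : ps ≠ [] := by intro he; subst he; simp at h2
  have hemins : mins ≠ [] := by simp [hm, hpsne]
  have hemaxs : maxs ≠ [] := by simp [hM, hpsne]
  have hget1 : ∀ (i : Nat) (hi : i < ps.length), (ps[i]'hi).1 = mins[i]'(by omega) := by
    intro i hi; simp [hm]
  have hget2 : ∀ (i : Nat) (hi : i < ps.length), (ps[i]'hi).2 = maxs[i]'(by omega) := by
    intro i hi; simp [hM]
  cases hgmin : PySem.List.min? mins (fun x => x) with
  | none => exact absurd ((PySem.List.min?_eq_none_iff _ _).mp hgmin) hemins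
  | some gmin =>
  cases hgmax : PySem.List.max? maxs (fun x => x) with
  | none => exact absurd ((PySem.List.max?_eq_none_iff _ _).mp hgmax) hemaxs
  | some gmax =>
  cases hkm : PySem.List.index? mins gmin with
  | none => exact absurd (PySem.List.min?_mem hgmin) ((PySem.List.index?_eq_none_iff _ _).mp hkm)
  | some kmin =>
  cases hkM : PySem.List.index? maxs gmax with
  | none => exact absurd (PySem.List.max?_mem hgmax) ((PySem.List.index?_eq_none_iff _ _).mp hkM)
  | some kmax =>
  obtain ⟨hkmlt, hkmval, -⟩ := PySem.List.getElem_of_index?_eq_some hkm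
  obtain ⟨hkMlt, hkMval, -⟩ := PySem.List.getElem_of_index?_eq_some hkM
  have hminle : ∀ y ∈ mins, gmin ≤ y := PySem.List.min?_isMin hgmin
  have hmaxge : ∀ y ∈ maxs, y ≤ gmax := PySem.List.max?_isMax hgmax
  unfold pvACore
  simp only [hgmin, hgmax, hkm, hkM]
  by_cases heq : kmin = kmax
  · rw [if_pos heq]
    rw [PySem.List.pop?_natCast mins kmin hkmlt, PySem.List.pop?_natCast maxs kmax hkMlt]
    have h1 : mins.eraseIdx kmin ≠ [] := by
      have hl := List.length_eraseIdx (l := mins) (i := kmin)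
      rw [if_pos hkmlt] at hl
      intro he; rw [he] at hl; simp at hl; omega
    have h2' : maxs.eraseIdx kmax ≠ [] := by
      have hl := List.length_eraseIdx (l := maxs) (i := kmax)
      rw [if_pos hkMlt] at hl
      intro he; rw [he] at hl; simp at hl; omega
    cases hsm : PySem.List.min? (mins.eraseIdx kmin) (fun x => x) with
    | none => exact absurd ((PySem.List.min?_eq_none_iff _ _).mp hsm) h1
    | some smin =>
    cases hsM : PySem.List.max? (maxs.eraseIdx kmax) (fun x => x) with
    | none => exact absurd ((PySem.List.max?_eq_none_iff _ _).mp hsM) h2'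
    | some smax =>
    simp only [hsm, hsM]
    have hsminle : ∀ y ∈ mins.eraseIdx kmin, smin ≤ y := PySem.List.min?_isMin hsm
    have hsmaxge : ∀ y ∈ maxs.eraseIdx kmax, y ≤ smax := PySem.List.max?_isMax hsM
    unfold IPM
    constructor
    · rcases max_choice (gmax - smin) (smax - gmin) with hch | hch
      · obtain ⟨i, hi, hine, hival⟩ :=
          List.mem_eraseIdx_iff_getElem.mp (PySem.List.min?_mem hsm)
        refine ⟨i, kmax, by omega, by omega, by omega, ?_⟩
        rw [hch, hget1 i (by omega), hget2 kmax (by omega)]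
        have h5 : mins[i]'hi = smin := hival
        omega
      · obtain ⟨j, hj, hjne, hjval⟩ :=
          List.mem_eraseIdx_iff_getElem.mp (PySem.List.max?_mem hsM)
        refine ⟨kmin, j, by omega, by omega, by omega, ?_⟩
        rw [hch, hget1 kmin (by omega), hget2 j (by omega)]
        have h5 : maxs[j]'hj = smax := hjval
        omega
    · intro i j hi hj hne
      rw [hget1 i hi, hget2 j hj]
      by_cases hik : i = kmin
      · subst hik
        have hjne : j ≠ kmax := by omega
        have hmem : maxs[j]'(by omega) ∈ maxs.eraseIdx kmax :=
          List.mem_eraseIdx_iff_getElem.mpr ⟨j, by omega, hjne, rfl⟩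
        have h3 := hsmaxge _ hmem
        have h4 : mins[i]'(by omega) = gmin := hkmval
        have h5 : smax - gmin ≤ max (gmax - smin) (smax - gmin) := le_max_right _ _
        omega
      · have hmem : mins[i]'(by omega) ∈ mins.eraseIdx kmin :=
          List.mem_eraseIdx_iff_getElem.mpr ⟨i, by omega, hik, rfl⟩
        have h3 := hsminle _ hmem
        have h4 := hmaxge _ (List.getElem_mem (l := maxs) (n := j) (by omega))
        have h5 : gmax - smin ≤ max (gmax - smin) (smax - gmin) := le_max_left _ _
        omega
  · rw [if_neg heq]
    unfold IPM
    constructor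
    · refine ⟨kmin, kmax, by omega, by omega, by omega, ?_⟩
      rw [hget1 kmin (by omega), hget2 kmax (by omega), hkmval, hkMval]
    · intro i j hi hj hne
      rw [hget1 i hi, hget2 j hj]
      have h3 := hminle _ (List.getElem_mem (l := mins) (n := i) (by omega))
      have h4 := hmaxge _ (List.getElem_mem (l := maxs) (n := j) (by omega))
      omega

theorem a_ipm (intervals : List (List Int)) (h : 2 ≤ intervals.length) :
    IPM (intervals.map pvPair) (max_distance intervals) := by
  have hA : max_distance intervals =
      pvACore ((intervals.map pvPair).map Prod.fst) ((intervals.map pvPair).map Prod.snd) := by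
    have h1 : (intervals.map pvPair).map Prod.fst =
        intervals.map (fun interval => (PySem.List.pyGet? interval 0).getD 0) := by
      rw [List.map_map]; rfl
    have h2 : (intervals.map pvPair).map Prod.snd =
        intervals.map (fun interval => (PySem.List.pyGet? interval (-1)).getD 0) := by
      rw [List.map_map]; rfl
    rw [h1, h2]
    rfl
  rw [hA]
  exact acore_ipm (intervals.map pvPair) (by simpa using h)

-- ===== VERDICT (by name: the statement is the Claim_ definition above) =====
theorem max_distance_spec : Claim_equal_max_distance := by
  intro intervals _ hpre
  unfold Spec_max_distance
  exact IPM_unique (a_ipm intervals hpre.1) (alt_ipm intervals hpre.1)
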